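-- pv_equiv track=rewrite | github.com/elviscgn/cs50-python | week_2/plates/plates.py | progressive_number
-- ===== SOURCE A (Python) =====
-- def progressive_number(s):
--     """
--     Check if a string is progressively numbers
--     only accepts strings with numbers
--     eg "123Bar" returns true
--     but "123bar3" returns false
--     """
--     numbers = []
--     closed = False
--     counter = 0
--     for char in s:
--         if char.isdigit():
--             numbers.append(char)
--             counter += 1
--             if closed:
--                 return False
--         if char.isalpha():
--             closed = True
--
--
--     if numbers[-1] == '0':
--         return False
--
--     if counter >= 1:
--         return True
--
--     return True
-- ===== SOURCE B (Python) =====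
-- def progressive_number(s):
--     digits = [c for c in s if c.isdigit()]
--     if digits[-1] == '0':
--         return False
--     first_alpha = next((i for i, c in enumerate(s) if c.isalpha()), len(s))
--     return not any(c.isdigit() for c in s[first_alpha:])
-- ===== Notes on version B (the rewrite author's own statement) =====
-- stated objective: alternative
-- what changed: Replaces A's single stateful pass with a closed-flag and an accumulated digit list by a precompute-then-position decomposition: collect the digits, reject a trailing zero digit, then locate the first alphabetic position and check that no digit occurs in the suffix from there on.
import Mathlib
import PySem

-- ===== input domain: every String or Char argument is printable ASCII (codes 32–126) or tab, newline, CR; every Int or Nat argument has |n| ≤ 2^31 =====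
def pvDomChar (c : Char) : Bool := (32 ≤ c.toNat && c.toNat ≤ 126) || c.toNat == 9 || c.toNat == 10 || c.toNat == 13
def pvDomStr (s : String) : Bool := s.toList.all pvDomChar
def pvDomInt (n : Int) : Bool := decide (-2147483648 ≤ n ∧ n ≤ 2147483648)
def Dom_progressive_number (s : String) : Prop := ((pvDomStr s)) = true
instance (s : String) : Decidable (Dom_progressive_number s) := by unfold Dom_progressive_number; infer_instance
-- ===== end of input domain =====

-- B is an alternative decomposition: precompute the digit list and the first alphabetic
-- position instead of A's single stateful pass with a closed-flag.

-- ===== PORT A =====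
-- A's for-loop: loop state (numbers, closed, counter); early return when a digit follows a
-- letter; at the end numbers[-1] is read (IndexError when no digit — those inputs are outside
-- Pre_; there this port's `none` case falls through to the final returns).
def pvGoA : List Char → List Char → Bool → Int → Bool
  | [], numbers, _closed, counter =>
      if PySem.List.pyGet? numbers (-1) == some '0' then false
      else if counter ≥ 1 then true else true
  | c :: rest, numbers, closed, counter =>
      let numbers' := if PySem.Chars.isdigit c then numbers ++ [c] else numbers
      let counter' := if PySem.Chars.isdigit c then counter + 1 else counter
      if PySem.Chars.isdigit c && closed then false
      else pvGoA rest numbers' (if PySem.Chars.isalpha c then true else closed) counter'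

def progressive_number (s : String) : Bool := pvGoA s.toList [] false 0

-- ===== PORT B =====
def progressive_number_alt (s : String) : Bool :=
  let cs := s.toList
  let digits := cs.filter (fun c => PySem.Chars.isdigit c)
  match PySem.List.pyGet? digits (-1) with
  | none => false  -- digits[-1] raises IndexError in Python here; excluded by Pre_
  | some d =>
    if d == '0' then false
    else
      let firstAlpha : Int :=
        (((PySem.List.enumerate cs 0).find? (fun p => PySem.Chars.isalpha p.2)).map (·.1)).getD
          (cs.length : Int)
      !((PySem.List.slice cs (some firstAlpha) none).any (fun c => PySem.Chars.isdigit c))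

-- ===== PRECONDITION & SPEC =====
-- Pre_ excludes exactly the strings with no digit: there both A and B raise IndexError on digits[-1].
def Pre_progressive_number (s : String) : Prop :=
  s.toList.any (fun c => PySem.Chars.isdigit c) = true
instance (s : String) : Decidable (Pre_progressive_number s) := by
  unfold Pre_progressive_number; infer_instance

def pvWitness_progressive_number : String := "12Ab"

def Spec_progressive_number (s : String) (out : Bool) : Prop := out = progressive_number_alt s
instance (s : String) (out : Bool) : Decidable (Spec_progressive_number s out) := by
  unfold Spec_progressive_number; infer_instance

-- ===== CLAIM (what is proved, stated in full; the proofs are below) =====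
def Claim_equal_progressive_number : Prop :=
  ∀ (s : String), Dom_progressive_number s → Pre_progressive_number s →
    Spec_progressive_number s (progressive_number s)

-- ===== LEMMAS AND PROOFS =====

-- "some digit occurs strictly after some letter"
def pvAdg : List Char → Bool
  | [] => false
  | c :: rest =>
      (PySem.Chars.isalpha c && rest.any (fun x => PySem.Chars.isdigit x)) || pvAdg rest

theorem pv_digit_not_alpha (c : Char) (h : PySem.Chars.isdigit c = true) :
    PySem.Chars.isalpha c = false := by
  have e0 : ('0':Char).val.toNat = 48 := by decide
  have e9 : ('9':Char).val.toNat = 57 := by decide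
  have eA : ('A':Char).val.toNat = 65 := by decide
  have eZ : ('Z':Char).val.toNat = 90 := by decide
  have ea : ('a':Char).val.toNat = 97 := by decide
  have ez : ('z':Char).val.toNat = 122 := by decide
  simp only [PySem.Chars.isdigit, PySem.Chars.isalpha, PySem.Chars.isupper, PySem.Chars.islower,
    Bool.and_eq_true, decide_eq_true_eq, Bool.or_eq_false_iff, Bool.and_eq_false_iff,
    decide_eq_false_iff_not, Char.le_def, UInt32.le_iff_toNat_le, e0, e9, eA, eZ, ea, ez] at *
  omega

theorem pv_alpha_not_digit (c : Char) (h : PySem.Chars.isalpha c = true) :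
    PySem.Chars.isdigit c = false := by
  by_cases hd : PySem.Chars.isdigit c = true
  · exact absurd (pv_digit_not_alpha c hd) (by simp [h])
  · simpa using hd

theorem pvAdg_any (cs : List Char) (h : pvAdg cs = true) :
    cs.any (fun x => PySem.Chars.isdigit x) = true := by
  induction cs with
  | nil => simp [pvAdg] at h
  | cons c rest ih =>
    simp only [pvAdg, Bool.or_eq_true, Bool.and_eq_true] at h
    rcases h with ⟨_, hd⟩ | h
    · simp [List.any_cons, hd]
    · simp [List.any_cons, ih h]

-- characterisation of A's loop
theorem pvGoA_eq (cs : List Char) (numbers : List Char) (closed : Bool) (counter : Int) :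
    pvGoA cs numbers closed counter =
      (if closed && cs.any (fun x => PySem.Chars.isdigit x) then false
       else if pvAdg cs then false
       else !((numbers ++ cs.filter (fun x => PySem.Chars.isdigit x)).getLast? == some '0')) := by
  induction cs generalizing numbers closed counter with
  | nil =>
    by_cases hg : numbers.getLast? = some '0' <;>
      simp [pvGoA, pvAdg, PySem.List.pyGet?_neg_one, hg]
  | cons c rest ih =>
    by_cases hd : PySem.Chars.isdigit c = true
    · have ha := pv_digit_not_alpha c hd
      by_cases hc : closed = true
      · simp [pvGoA, hd, hc, List.any_cons]
      · have hc' : closed = false := by simpa using hc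
        simp [pvGoA, hd, hc', ha, pvAdg, ih, List.any_cons]
    · have hd' : PySem.Chars.isdigit c = false := by simpa using hd
      by_cases ha : PySem.Chars.isalpha c = true
      · cases hr : rest.any (fun x => PySem.Chars.isdigit x) with
        | true => simp [pvGoA, hd', ha, pvAdg, ih, List.any_cons, hr]
        | false =>
          have hadg : pvAdg rest = false := by
            by_cases h2 : pvAdg rest = true
            · rw [pvAdg_any rest h2] at hr; exact absurd hr (by simp)
            · simpa using h2
          simp [pvGoA, hd', ha, pvAdg, ih, List.any_cons, hr, hadg]
      · have ha' : PySem.Chars.isalpha c = false := by simpa using ha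
        simp [pvGoA, hd', ha', pvAdg, ih, List.any_cons]

-- the first-alpha index B computes via enumerate/find? is List.findIdx
theorem pv_enum_find (cs : List Char) (s : Int) :
    ((((PySem.List.enumerate cs s).find? (fun p => PySem.Chars.isalpha p.2)).map (·.1)).getD
      (s + (cs.length : Int))) = s + (cs.findIdx (fun c => PySem.Chars.isalpha c) : Int) := by
  induction cs generalizing s with
  | nil => simp [PySem.List.enumerate_nil, List.findIdx_nil]
  | cons c rest ih =>
    rw [PySem.List.enumerate_cons]
    by_cases h : PySem.Chars.isalpha c = true
    · simp [h, List.findIdx_cons]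
    · have h' : PySem.Chars.isalpha c = false := by simpa using h
      have ih' := ih (s + 1)
      simp only [List.find?_cons, h', List.findIdx_cons, cond_false, List.length_cons] at *
      push_cast at *
      rw [show s + ((rest.length : Int) + 1) = s + 1 + (rest.length : Int) by ring, ih']
      ring

-- the suffix check equals pvAdg
theorem pv_drop_adg (cs : List Char) :
    ((cs.drop (cs.findIdx (fun c => PySem.Chars.isalpha c))).any
      (fun c => PySem.Chars.isdigit c)) = pvAdg cs := by
  induction cs with
  | nil => simp [pvAdg]
  | cons c rest ih =>
    by_cases h : PySem.Chars.isalpha c = true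
    · simp only [List.findIdx_cons, h, cond_true, List.drop_zero, List.any_cons, pvAdg,
        pv_alpha_not_digit c h, Bool.false_or, Bool.true_and]
      cases hr : pvAdg rest with
      | true => simp [pvAdg_any rest hr]
      | false => simp
    · have h' : PySem.Chars.isalpha c = false := by simpa using h
      simp [List.findIdx_cons, h', pvAdg, ih]

-- ===== VERDICT (by name: the statement is the Claim_ definition above) =====
theorem progressive_number_spec : Claim_equal_progressive_number := by
  intro s _dom pre
  unfold Spec_progressive_number
  unfold Pre_progressive_number at pre
  show pvGoA s.toList [] false 0 = _
  rw [pvGoA_eq]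
  have hne : s.toList.filter (fun c => PySem.Chars.isdigit c) ≠ [] := by
    intro hnil
    rw [List.filter_eq_nil_iff] at hnil
    rw [List.any_eq_true] at pre
    obtain ⟨x, hx, hdx⟩ := pre
    exact absurd hdx (by simpa using hnil x hx)
  obtain ⟨d, hd⟩ : ∃ d, (s.toList.filter (fun c => PySem.Chars.isdigit c)).getLast? = some d := by
    cases hg : (s.toList.filter (fun c => PySem.Chars.isdigit c)).getLast? with
    | none => exact absurd (List.getLast?_eq_none_iff.mp hg) hne
    | some d => exact ⟨d, rfl⟩
  have hfa := pv_enum_find s.toList 0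
  simp only [zero_add] at hfa
  simp only [progressive_number_alt, PySem.List.pyGet?_neg_one, hd, hfa,
    PySem.List.slice_from_natCast, pv_drop_adg, Bool.false_and, Bool.false_eq_true, if_false]
  by_cases hadg : pvAdg s.toList = true
  · by_cases h0 : d = '0' <;> simp [hadg, h0]
  · have hadg' : pvAdg s.toList = false := by simpa using hadg
    by_cases h0 : d = '0' <;> simp [hadg', h0, hd]
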